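-- pv_equiv track=rewrite | github.com/VyacheslavH2O/NT-Perfomance-Lab | task1.py | circular_array
-- ===== SOURCE A (Python) =====
-- def circular_array(n, m):
--     nums_arr = list(range(1, n + 1))
--     path = []
--     index = 0
--     path.append(nums_arr[index])
--     while (index + m - 1) % n != 0:
--         index = (index + m - 1) % n
--         path.append(nums_arr[index])
--     return ''.join(map(str, path))
-- ===== SOURCE B (Python) =====
-- import math
--
-- def circular_array(n, m):
--     step = (m - 1) % n
--     count = n // math.gcd(n, step) if step else 1
--     return ''.join(str(k * step % n + 1) for k in range(count))
-- ===== Notes on version B (the rewrite author's own statement) =====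
-- stated objective: faster
-- what changed: A builds list(range(1,n+1)) and walks the circle index-by-index, appending until the walk returns to index 0; B builds no list and does no walk: it computes the visit count in closed form as n // gcd(n, (m-1) % n) and produces each visited value independently as k*step % n + 1. Pre_ excludes n <= 0, where A raises IndexError (its nums list is empty).
import Mathlib
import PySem

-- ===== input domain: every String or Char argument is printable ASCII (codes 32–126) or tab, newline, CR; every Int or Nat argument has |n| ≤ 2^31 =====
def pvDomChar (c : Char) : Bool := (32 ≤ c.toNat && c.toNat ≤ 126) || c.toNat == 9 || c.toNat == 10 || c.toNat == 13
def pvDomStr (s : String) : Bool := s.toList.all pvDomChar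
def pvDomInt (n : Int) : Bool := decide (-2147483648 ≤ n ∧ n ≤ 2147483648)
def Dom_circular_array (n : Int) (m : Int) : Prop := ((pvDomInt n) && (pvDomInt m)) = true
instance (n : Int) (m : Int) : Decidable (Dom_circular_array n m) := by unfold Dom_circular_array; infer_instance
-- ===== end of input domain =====

-- B replaces A's step-by-step walk of the circle by a closed-form visit count n // gcd(n, (m-1) % n),
-- producing each visited value independently as k*step % n + 1 (objective: alternative; equivalence
-- proved on Pre_: 1 ≤ n, where A returns).

-- ===== PORT A =====
-- A's while loop; the fuel n.toNat suffices on Pre_ (the walk returns to index 0 within n steps)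
def circLoopA (n : Int) (m : Int) (nums : List Int) : Nat → Int → List Int → List Int
  | 0, _, path => path
  | fuel+1, index, path =>
    if PySem.Int.mod (index + m - 1) n ≠ 0 then
      circLoopA n m nums fuel (PySem.Int.mod (index + m - 1) n)
        (path ++ [PySem.List.pyGetD nums (PySem.Int.mod (index + m - 1) n) 0])
    else path

def circular_array (n : Int) (m : Int) : String :=
  let nums := PySem.List.pyRange 1 (n+1) 1
  match PySem.List.pyGet? nums 0 with
  | none => ""  -- IndexError (n ≤ 0), outside Pre_
  | some v =>
    PySem.Str.join "" ((circLoopA n m nums n.toNat 0 [v]).map PySem.Int.toStr)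

-- ===== PORT B =====
-- math.gcd(a, b) = gcd of absolute values; ported as Int.gcd (exact on all ints)
def circular_array_alt (n : Int) (m : Int) : String :=
  let step := PySem.Int.mod (m - 1) n
  let count := if step ≠ 0 then PySem.Int.floordiv n (Int.gcd n step : Int) else 1
  PySem.Str.join "" ((PySem.List.pyRange 0 count 1).map
    (fun k => PySem.Int.toStr (PySem.Int.mod (k * step) n + 1)))

-- ===== PRECONDITION & SPEC =====
-- Pre_ excludes exactly n ≤ 0, where A raises IndexError on nums_arr[0] (list(range(1, n+1)) is empty).
def Pre_circular_array (n : Int) (m : Int) : Prop := 1 ≤ n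
instance (n : Int) (m : Int) : Decidable (Pre_circular_array n m) := by unfold Pre_circular_array; infer_instance
def pvWitness_circular_array : Int × Int := (6, 4)

def Spec_circular_array (n : Int) (m : Int) (out : String) : Prop := out = circular_array_alt n m
instance (n : Int) (m : Int) (out : String) : Decidable (Spec_circular_array n m out) := by unfold Spec_circular_array; infer_instance

-- ===== CLAIM (what is proved, stated in full; the proofs are below) =====
def Claim_equal_circular_array : Prop := ∀ (n : Int) (m : Int), Dom_circular_array n m → Pre_circular_array n m → Spec_circular_array n m (circular_array n m)

-- ===== LEMMAS AND PROOFS =====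

-- the visited values: nums[j] = j + 1
theorem nums_getD (n : Int) (j : Nat) (hj : (j : Int) < n) :
    PySem.List.pyGetD (PySem.List.pyRange 1 (n+1) 1) (j : Int) 0 = (j : Int) + 1 := by
  rw [PySem.List.pyGetD_natCast, PySem.List.pyRange_one]
  have hjlt : j < (n + 1 - 1).toNat := by omega
  rw [List.getD_eq_getElem?_getD, List.getElem?_map, List.getElem?_range hjlt]
  simp [add_comm]

-- key number theory: the walk is back at index 0 exactly at multiples of N / gcd N S
theorem cycle_iff (N S : Nat) (hN : 0 < N) (t : Nat) :
    (t * S) % N = 0 ↔ (N / Nat.gcd N S) ∣ t := by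
  rcases Nat.eq_zero_or_pos S with hS | hS
  · subst hS
    simp [Nat.gcd_zero_right, Nat.div_self hN]
  · have hg : 0 < Nat.gcd N S := Nat.gcd_pos_of_pos_right _ hS
    have hgN : Nat.gcd N S ∣ N := Nat.gcd_dvd_left _ _
    have hgS : Nat.gcd N S ∣ S := Nat.gcd_dvd_right _ _
    have hco : (N / Nat.gcd N S).Coprime (S / Nat.gcd N S) := Nat.coprime_div_gcd_div_gcd hg
    rw [← Nat.dvd_iff_mod_eq_zero]
    constructor
    · intro h
      have h2 : N / Nat.gcd N S ∣ t * (S / Nat.gcd N S) := by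
        have : (N / Nat.gcd N S) * Nat.gcd N S ∣ (t * (S / Nat.gcd N S)) * Nat.gcd N S := by
          rw [Nat.div_mul_cancel hgN, mul_assoc, Nat.div_mul_cancel hgS]
          exact h
        exact (Nat.mul_dvd_mul_iff_right hg).mp this
      exact hco.dvd_of_dvd_mul_right h2
    · intro h
      calc N = (N / Nat.gcd N S) * Nat.gcd N S := (Nat.div_mul_cancel hgN).symm
        _ ∣ t * Nat.gcd N S := Nat.mul_dvd_mul_right h _
        _ ∣ t * S := Nat.mul_dvd_mul_left t hgS

-- the loop trace: starting at index (k*S) % N, A's loop appends the values at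
-- ((k+1)*S) % N, ((k+2)*S) % N, … until the first multiple of N / gcd N S steps
theorem loopA_eq (n m : Int) (N S : Nat) (hn : (N : Int) = n) (hN : 0 < N)
    (hstep : PySem.Int.mod (m - 1) n = (S : Int)) :
    ∀ (fuel k : Nat) (path : List Int), k < N / Nat.gcd N S → N / Nat.gcd N S ≤ fuel + k + 1 →
      circLoopA n m (PySem.List.pyRange 1 (n+1) 1) fuel ((k * S % N : Nat) : Int) path
      = path ++ (List.range' (k+1) (N / Nat.gcd N S - (k+1))).map
          (fun j => ((j * S % N : Nat) : Int) + 1) := by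
  have hnpos : (0:Int) < n := by omega
  have hcount_le : N / Nat.gcd N S ≤ N := Nat.div_le_self _ _
  have hcond : ∀ k : Nat, PySem.Int.mod (((k * S % N : Nat) : Int) + m - 1) n
      = (((k+1) * S % N : Nat) : Int) := by
    intro k
    rw [PySem.Int.mod_eq_emod_of_pos hnpos]
    have hstep' : (m - 1) % n = (S : Int) := by
      rw [← PySem.Int.mod_eq_emod_of_pos hnpos]; exact hstep
    have : (((k * S % N : Nat) : Int) + m - 1) % n
        = (((k * S % N : Nat) : Int) + ((m - 1) % n)) % n := by
      conv_lhs => rw [add_sub_assoc]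
      rw [Int.add_emod_emod]
    rw [this, hstep', ← hn, ← Int.natCast_add, ← Int.natCast_mod]
    norm_cast
    rw [Nat.mod_add_mod, add_mul, one_mul]
  intro fuel
  induction fuel with
  | zero =>
    intro k path hk hfuel
    have : N / Nat.gcd N S = k + 1 := by omega
    rw [circLoopA, this]
    simp
  | succ fuel ih =>
    intro k path hk hfuel
    rw [circLoopA]
    rw [hcond k]
    by_cases hkc : k + 1 = N / Nat.gcd N S
    · have hzero : ((k+1) * S % N) = 0 := by
        rw [cycle_iff N S hN]; exact hkc ▸ dvd_refl _
      rw [hzero]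
      simp [hkc]
    · have hlt : k + 1 < N / Nat.gcd N S := by omega
      have hnz : ((k+1) * S % N) ≠ 0 := by
        intro h0
        rw [cycle_iff N S hN] at h0
        have := Nat.le_of_dvd (by omega) h0
        omega
      have hnz' : (((k+1) * S % N : Nat) : Int) ≠ 0 := by exact_mod_cast hnz
      rw [if_pos hnz']
      rw [nums_getD n ((k+1) * S % N) (by rw [← hn]; exact_mod_cast Nat.mod_lt _ hN)]
      rw [ih (k+1) _ hlt (by omega)]
      rw [List.append_assoc]
      congr 1
      have hrange : List.range' (k+1) (N / Nat.gcd N S - (k+1))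
          = (k+1) :: List.range' (k+2) (N / Nat.gcd N S - (k+2)) := by
        have : N / Nat.gcd N S - (k+1) = (N / Nat.gcd N S - (k+2)) + 1 := by omega
        rw [this, List.range'_succ]
      rw [hrange]
      simp

-- the two ports agree on Pre_
theorem main_eq (n m : Int) (hpre : 1 ≤ n) : circular_array n m = circular_array_alt n m := by
  have hnpos : (0:Int) < n := by omega
  set N := n.toNat with hNdef
  have hn : (N : Int) = n := Int.toNat_of_nonneg (by omega)
  have hN : 0 < N := by omega
  set step := PySem.Int.mod (m - 1) n with hstepdef
  have hstep0 : 0 ≤ step := PySem.Int.mod_nonneg _ hnpos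
  set S := step.toNat with hSdef
  have hstep : PySem.Int.mod (m - 1) n = (S : Int) := by
    rw [← hstepdef]; exact (Int.toNat_of_nonneg hstep0).symm
  have hSlt : S < N := by
    have := PySem.Int.mod_lt (m - 1) hnpos
    omega
  set c := N / Nat.gcd N S with hcdef
  have hg : 0 < Nat.gcd N S := Nat.gcd_pos_of_pos_left _ hN
  have hc1 : 0 < c := Nat.div_pos (Nat.le_of_dvd hN (Nat.gcd_dvd_left _ _)) hg
  have hget : PySem.List.pyGet? (PySem.List.pyRange 1 (n+1) 1) 0 = some 1 := by
    rw [PySem.List.pyGet?_zero, PySem.List.pyRange_one]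
    rw [List.getElem?_map, List.getElem?_range (by omega : 0 < (n+1-1).toNat)]
    simp
  rw [circular_array, circular_array_alt]
  simp only [hget, ← hstepdef]
  -- A side: evaluate the loop
  have h00 : ((0 * S % N : Nat) : Int) = 0 := by norm_num
  have hcN : c ≤ N := Nat.div_le_self _ _
  have hloop := loopA_eq n m N S hn hN hstep N 0 [1] hc1 (by omega)
  rw [h00] at hloop
  rw [hloop]
  -- count = c
  have hcount : (if step ≠ 0 then PySem.Int.floordiv n (Int.gcd n step : Int) else 1) = (c : Int) := by
    by_cases hs : step = 0
    · have hS0 : S = 0 := by simp [hSdef, hs]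
      rw [if_neg (by simp [hs])]
      rw [hcdef, hS0, Nat.gcd_zero_right, Nat.div_self hN, Nat.cast_one]
    · rw [if_pos hs]
      have hgcd : Int.gcd n step = Nat.gcd N S := by
        rw [hstepdef, hstep, ← hn]; simp [Int.gcd]
      rw [hgcd, ← hn, PySem.Int.floordiv_natCast]
  rw [hcount]
  congr 1
  have hBrange : PySem.List.pyRange 0 (c : Int) 1 = (List.range' 0 c).map (fun j : Nat => (j : Int)) := by
    rw [PySem.List.pyRange_one, ← List.range_eq_range']
    simp
  rw [hBrange, List.map_map]
  have hr : List.range' 0 c = 0 :: List.range' 1 (c - 1) := by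
    have hc' : c = (c - 1) + 1 := by omega
    conv_lhs => rw [hc', List.range'_succ]
  rw [hr]
  simp only [List.map_cons, List.map_append, List.map_nil, List.map_map]
  have helem : ∀ j : Nat,
      PySem.Int.toStr (PySem.Int.mod ((j : Int) * step) n + 1)
      = PySem.Int.toStr (((j * S % N : Nat) : Int) + 1) := by
    intro j
    rw [hstepdef, hstep, ← hn, show ((j : Int) * (S : Int)) = ((j * S : Nat) : Int) by push_cast; ring]
    rw [PySem.Int.mod_natCast]
  rw [List.singleton_append]
  congr 1
  · rw [Function.comp_apply, helem 0]
    norm_num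
  · apply List.map_congr_left
    intro j _
    rw [Function.comp_apply, Function.comp_apply]
    exact (helem j).symm

-- ===== VERDICT (by name: the statement is the Claim_ definition above) =====
theorem circular_array_spec : Claim_equal_circular_array := by
  intro n m _dom hpre
  unfold Spec_circular_array
  exact main_eq n m hpre
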